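-- pv_equiv track=rewrite | github.com/hillel-i-python-pro-i-2023-06-23/homework_dmytro_palamarchuk__N8 | app/services/astronauts_task.py | get_station_astronauts
-- ===== SOURCE A (Python) =====
-- def get_station_astronauts(astronauts_list: list) -> dict:
--     """
--     Sort astronauts by space stations
--
--     Parameters
--     ----------
--     astronauts_list: list
--         list astronauts
--
--     Returns
--     -------
--     spacestation_list : dict
--         The space stations list
--     """
--     spacestation_list = {}
--     for astronauts in astronauts_list:
--         craft = astronauts["craft"]
--         name = astronauts["name"]
--         if craft in spacestation_list:
--             spacestation_list[craft].append(name)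
--         else:
--             spacestation_list[craft] = [name]
--
--     return spacestation_list
-- ===== SOURCE B (Python) =====
-- def get_station_astronauts(astronauts_list: list) -> dict:
--     """Group astronaut names by their space station (two-pass version)."""
--     crafts = list(dict.fromkeys(a["craft"] for a in astronauts_list))
--     return {
--         craft: [a["name"] for a in astronauts_list if a["craft"] == craft]
--         for craft in crafts
--     }
-- ===== Notes on version B (the rewrite author's own statement) =====
-- stated objective: alternative
-- what changed: Replaces the single-pass mutable-dict accumulation (membership test, then append-or-create) with a two-pass declarative form: dedup the craft keys in first-occurrence order, then build the dict with one filtering comprehension per craft.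
-- outside the precondition, e.g. on get_station_astronauts([{'name': 'Bob'}]): A raises KeyError, B raises KeyError
import Mathlib
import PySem

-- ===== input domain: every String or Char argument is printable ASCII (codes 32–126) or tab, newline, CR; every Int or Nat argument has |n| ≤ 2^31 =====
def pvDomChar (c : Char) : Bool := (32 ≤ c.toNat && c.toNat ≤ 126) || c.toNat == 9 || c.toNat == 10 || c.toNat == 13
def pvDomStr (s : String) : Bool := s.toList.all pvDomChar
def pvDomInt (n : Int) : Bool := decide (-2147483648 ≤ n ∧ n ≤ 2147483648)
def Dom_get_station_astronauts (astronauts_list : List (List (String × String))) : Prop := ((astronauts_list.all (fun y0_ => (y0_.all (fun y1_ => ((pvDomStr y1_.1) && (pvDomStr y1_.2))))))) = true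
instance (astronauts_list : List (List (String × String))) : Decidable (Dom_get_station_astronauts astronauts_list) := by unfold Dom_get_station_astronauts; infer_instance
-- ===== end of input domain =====

-- B replaces A's single-pass mutable-dict accumulation with a two-pass form (dedup crafts, then one filter per craft); alternative decomposition, same result.


-- ===== PORT A =====
-- each record is a Python dict; a["craft"] = first-match lookup, KeyError (none) excluded by Pre_
def pvLookup (a : List (String × String)) (k : String) : String :=
  ((PySem.Dict.mk a).get? k).getD ""

def get_station_astronauts (astronauts_list : List (List (String × String))) : List (String × List String) :=
  (astronauts_list.foldl (fun spacestation_list astronauts =>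
      let craft := pvLookup astronauts "craft"
      let name := pvLookup astronauts "name"
      if spacestation_list.contains craft then
        spacestation_list.modify craft [] (fun v => v ++ [name])
      else
        spacestation_list.insert craft [name])
    PySem.Dict.empty).items

-- ===== PORT B =====
def get_station_astronauts_alt (astronauts_list : List (List (String × String))) : List (String × List String) :=
  let crafts := PySem.List.dedup (astronauts_list.map (fun a => pvLookup a "craft"))
  crafts.map (fun craft =>
    (craft, (astronauts_list.filter (fun a => pvLookup a "craft" == craft)).map
              (fun a => pvLookup a "name")))

-- ===== PRECONDITION & SPEC =====
-- Pre_ excludes exactly the records missing a "craft" or "name" key, where Python A raises KeyError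
def Pre_get_station_astronauts (astronauts_list : List (List (String × String))) : Prop :=
  ∀ a ∈ astronauts_list, ((PySem.Dict.mk a).get? "craft").isSome ∧ ((PySem.Dict.mk a).get? "name").isSome
instance (astronauts_list : List (List (String × String))) : Decidable (Pre_get_station_astronauts astronauts_list) := by unfold Pre_get_station_astronauts; infer_instance
def pvWitness_get_station_astronauts : (List (List (String × String))) :=
  [[("craft", "ISS"), ("name", "Bob")], [("craft", "Tiangong"), ("name", "Li")], [("craft", "ISS"), ("name", "Ann")]]

def Spec_get_station_astronauts (astronauts_list : List (List (String × String))) (out : List (String × List String)) : Prop := out = get_station_astronauts_alt astronauts_list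
instance (astronauts_list : List (List (String × String))) (out : List (String × List String)) : Decidable (Spec_get_station_astronauts astronauts_list out) := by unfold Spec_get_station_astronauts; infer_instance

-- ===== CLAIM (what is proved, stated in full; the proofs are below) =====
def Claim_equal_get_station_astronauts : Prop := ∀ (astronauts_list : List (List (String × String))), Dom_get_station_astronauts astronauts_list → Pre_get_station_astronauts astronauts_list → Spec_get_station_astronauts astronauts_list (get_station_astronauts astronauts_list)

-- ===== LEMMAS AND PROOFS =====

-- A's branch collapses: both arms are exactly 'modify craft [] (· ++ [name])'
theorem step_eq_modify (d : PySem.Dict String (List String)) (c n : String) :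
    (if d.contains c then d.modify c [] (fun v => v ++ [n]) else d.insert c [n])
      = d.modify c [] (fun v => v ++ [n]) := by
  by_cases h : d.contains c = true
  · simp [h]
  · have h' : d.contains c = false := by simpa using h
    simp [h', PySem.Dict.modify, PySem.Dict.getD_of_not_contains d ([] : List String) h']

-- with Nodup keys, items is keys paired with their getD values
theorem items_eq_map_keys (d : PySem.Dict String (List String)) (h : d.keys.Nodup) :
    d.items = d.keys.map (fun k => (k, d.getD k [])) := by
  simp only [PySem.Dict.keys, List.map_map]
  conv_lhs => rw [← List.map_id d.items]
  apply List.map_congr_left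
  intro p hp
  have := PySem.Dict.getD_of_mem_items (d := d) (d0 := []) (k := p.1) (v := p.2) (by simpa using hp) h
  simp [this]

theorem get_station_astronauts_spec' (l : List (List (String × String))) :
    get_station_astronauts l = get_station_astronauts_alt l := by
  unfold get_station_astronauts get_station_astronauts_alt
  have hstep : (l.foldl (fun d a =>
      let craft := pvLookup a "craft"
      let name := pvLookup a "name"
      if d.contains craft then d.modify craft [] (fun v => v ++ [name])
      else d.insert craft [name]) PySem.Dict.empty)
      = (l.map (fun a => (pvLookup a "craft", pvLookup a "name"))).foldl
          (fun d p => d.modify p.1 [] (fun v => v ++ [p.2])) PySem.Dict.empty := by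
    rw [List.foldl_map]
    apply PySem.List.foldl_congr_mem
    intro d a _
    exact step_eq_modify d _ _
  rw [hstep]
  set ps := l.map (fun a => (pvLookup a "craft", pvLookup a "name")) with hps
  set D := ps.foldl (fun d p => d.modify p.1 [] (fun v => v ++ [p.2])) PySem.Dict.empty with hD
  have hkeys : D.keys = PySem.Set.update ((PySem.Dict.empty : PySem.Dict String (List String)).keys) (ps.map (·.1)) := by
    rw [hD]
    exact PySem.Dict.keys_foldl_modify_key ps (·.1) [] (fun _ p v => v ++ [p.2]) PySem.Dict.empty
  have hkeys' : D.keys = PySem.List.dedup (l.map (fun a => pvLookup a "craft")) := by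
    rw [hkeys, hps]
    simp [PySem.Dict.keys_empty, List.map_map, Function.comp_def, PySem.List.dedup_eq_ofList,
      PySem.Set.update, PySem.Set.ofList_eq_foldl]
  have hnodup : D.keys.Nodup := by
    rw [hkeys']; exact PySem.List.nodup_dedup _
  rw [items_eq_map_keys D hnodup, hkeys']
  show _ = (PySem.List.dedup (l.map (fun a => pvLookup a "craft"))).map
    (fun craft => (craft, (l.filter (fun a => pvLookup a "craft" == craft)).map (fun a => pvLookup a "name")))
  apply List.map_congr_left
  intro c _
  have hget : D.getD c [] = PySem.Dict.empty.getD c [] ++ (ps.filter (fun p => p.1 == c)).map (·.2) :=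
    PySem.Dict.getD_foldl_modify_append ps PySem.Dict.empty c
  simp only [hget, PySem.Dict.getD_empty, List.nil_append, hps, List.filter_map, List.map_map]
  simp [Function.comp_def]

-- ===== VERDICT (by name: the statement is the Claim_ definition above) =====
theorem get_station_astronauts_spec : Claim_equal_get_station_astronauts := by
  intro l _ _
  exact get_station_astronauts_spec' l
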